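-- pv_equiv track=rewrite | github.com/birdflow-science/BirdFlowPy | flow_model.py | gen_shift_list
-- ===== SOURCE A (Python) =====
-- def gen_shift_list(nan_mask):
--     shift = 0
--     shift_list = []
--
--     for b in nan_mask:
--         if b:
--             shift += 1
--         else:
--             shift_list.append(shift)
--     return shift_list
-- ===== SOURCE B (Python) =====
-- def gen_shift_list(nan_mask):
--     xs = list(nan_mask)
--     cum = []
--     t = 0
--     for b in xs:
--         t += 1 if b else 0
--         cum.append(t)
--     return [c for b, c in zip(xs, cum) if not b]
-- ===== Notes on version B (the rewrite author's own statement) =====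
-- stated objective: alternative
-- what changed: B first builds an inclusive prefix-sum of the mask, then a second zip-and-filter pass keeps the cumulative count at each False position, instead of A's single loop that interleaves counting and appending.
import Mathlib
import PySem

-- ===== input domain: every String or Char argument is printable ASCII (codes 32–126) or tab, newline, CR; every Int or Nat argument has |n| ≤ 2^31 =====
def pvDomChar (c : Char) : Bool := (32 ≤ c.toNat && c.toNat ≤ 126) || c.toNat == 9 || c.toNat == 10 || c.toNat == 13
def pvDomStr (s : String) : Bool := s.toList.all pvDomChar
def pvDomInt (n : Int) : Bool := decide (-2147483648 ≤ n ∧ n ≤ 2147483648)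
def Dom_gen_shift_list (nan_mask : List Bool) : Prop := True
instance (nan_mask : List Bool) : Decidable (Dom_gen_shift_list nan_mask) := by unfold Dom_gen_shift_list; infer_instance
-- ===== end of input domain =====

-- B builds an inclusive prefix-sum first and then zip-filters; A counts and appends in one loop. Objective: alternative decomposition.

-- ===== PORT A =====
def gen_shift_list (nan_mask : List Bool) : List Int :=
  (nan_mask.foldl
    (fun (st : Int × List Int) b =>
      if b then (st.1 + 1, st.2) else (st.1, st.2 ++ [st.1]))
    (0, [])).2

-- ===== PORT B =====
def gen_shift_list_alt (nan_mask : List Bool) : List Int :=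
  let cum := (nan_mask.foldl
    (fun (st : Int × List Int) b =>
      let t := st.1 + (if b then 1 else 0)
      (t, st.2 ++ [t]))
    (0, [])).2
  ((nan_mask.zip cum).filter (fun p => !p.1)).map (fun p => p.2)

-- ===== PRECONDITION & SPEC =====
def Spec_gen_shift_list (nan_mask : List Bool) (out : List Int) : Prop := out = gen_shift_list_alt nan_mask
instance (nan_mask : List Bool) (out : List Int) : Decidable (Spec_gen_shift_list nan_mask out) := by unfold Spec_gen_shift_list; infer_instance

-- ===== CLAIM (what is proved, stated in full; the proofs are below) =====
def Claim_equal_gen_shift_list : Prop := ∀ (nan_mask : List Bool), Dom_gen_shift_list nan_mask → Spec_gen_shift_list nan_mask (gen_shift_list nan_mask)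

-- ===== LEMMAS AND PROOFS =====

-- reference recursion: counts of Trues before each False, starting from s
def pvG (l : List Bool) (s : Int) : List Int :=
  match l with
  | [] => []
  | true :: bs => pvG bs (s + 1)
  | false :: bs => s :: pvG bs s

-- reference recursion for the inclusive prefix-sum list
def pvC (l : List Bool) (t : Int) : List Int :=
  match l with
  | [] => []
  | b :: bs => (t + (if b then 1 else 0)) :: pvC bs (t + (if b then 1 else 0))

theorem pvA_foldl (l : List Bool) (s : Int) (acc : List Int) :
    (l.foldl (fun (st : Int × List Int) b =>
        if b then (st.1 + 1, st.2) else (st.1, st.2 ++ [st.1])) (s, acc)).2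
      = acc ++ pvG l s := by
  induction l generalizing s acc with
  | nil => simp [pvG]
  | cons b bs ih =>
    cases b <;> simp [pvG, List.foldl, ih]

theorem pvC_foldl (l : List Bool) (t : Int) (acc : List Int) :
    (l.foldl (fun (st : Int × List Int) b =>
        (st.1 + (if b then 1 else 0), st.2 ++ [st.1 + (if b then 1 else 0)])) (t, acc)).2
      = acc ++ pvC l t := by
  induction l generalizing t acc with
  | nil => simp [pvC]
  | cons b bs ih =>
    simp [pvC, List.foldl, ih]

theorem pvB_zip (l : List Bool) (t : Int) :
    ((l.zip (pvC l t)).filter (fun p => !p.1)).map (fun p => p.2) = pvG l t := by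
  induction l generalizing t with
  | nil => simp [pvC, pvG]
  | cons b bs ih =>
    cases b <;> simp [pvC, pvG, List.zip_cons_cons, ih]

-- ===== VERDICT (by name: the statement is the Claim_ definition above) =====
theorem gen_shift_list_spec : Claim_equal_gen_shift_list := by
  intro nan_mask _
  unfold Spec_gen_shift_list gen_shift_list gen_shift_list_alt
  simp only [pvA_foldl, pvC_foldl, List.nil_append]
  exact (pvB_zip nan_mask 0).symm
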